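-- pv_equiv track=rewrite | github.com/inbeomi/til | algorithm/programmers/신규_아이디_추천.py | solution
-- ===== SOURCE A (Python) =====
-- special = ['-', '_', '.']
--
-- def solution(new_id):
--
--     # 1단계
--     new_id = new_id.lower()
--
--     # 2단계
--     temp = ''
--     for i in new_id:
--         if i.isalnum() or i in special: # isalnum()... ()를 꼭 넣자.
--             temp += i
--     new_id = temp
--
--     # 3단계
--     temp = new_id[0]
--     for i in range(1, len(new_id)):
--         if new_id[i] == '.' and temp[-1] == '.':
--             continue
--         else:
--             temp += new_id[i]
--     new_id = temp
--
--     # 4단계 -> 제한사항에서 걸림. 데이터가 한 개 있는 경우가 있어서..!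
--     if len(new_id) >= 2:
--         if new_id[0] == '.':
--             new_id = new_id[1:]
--         if new_id[-1] == '.':
--             new_id = new_id[:-1]
--     else:
--         if new_id == '.':
--             new_id = ''
--
--     # 5단계
--     if new_id == '':
--         new_id = 'a'
--
--     # 6단계
--     if len(new_id) >= 16:
--         new_id = new_id[:15]
--         if new_id[-1] == '.':
--             new_id = new_id[:-1]
--
--     # 7단계
--     while len(new_id) <= 2:
--         new_id = new_id + new_id[-1]
--
--
--     return new_id
-- ===== SOURCE B (Python) =====
-- def solution(new_id):
--     s = ''.join(c for c in new_id.lower() if c.isalnum() or c in '-_.')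
--     s = '.'.join(p for p in s.split('.') if p)
--     if not s:
--         s = 'a'
--     s = s[:15].rstrip('.')
--     return s.ljust(3, s[-1])
-- ===== Notes on version B (the rewrite author's own statement) =====
-- stated objective: idiomatic
-- what changed: Replaces A's index/look-back loops and branch ladders with a split/join pipeline: filter, split on the dot separator discarding empty pieces and rejoin (which collapses separator runs and strips edge separators in one step), truncate with rstrip, and pad via ljust; bulk join/str-methods replace A's per-character string concatenation.
import Mathlib
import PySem

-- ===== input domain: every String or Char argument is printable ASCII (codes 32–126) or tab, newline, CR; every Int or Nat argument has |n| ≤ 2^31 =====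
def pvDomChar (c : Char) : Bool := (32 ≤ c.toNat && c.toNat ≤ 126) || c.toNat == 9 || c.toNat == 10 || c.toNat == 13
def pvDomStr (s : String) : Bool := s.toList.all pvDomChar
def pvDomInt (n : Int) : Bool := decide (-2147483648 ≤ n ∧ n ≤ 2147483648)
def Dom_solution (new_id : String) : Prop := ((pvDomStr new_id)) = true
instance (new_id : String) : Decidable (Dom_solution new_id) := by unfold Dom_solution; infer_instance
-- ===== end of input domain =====

-- B replaces A's index/look-back loops by a split-on-dot / join pipeline (idiomatic; bulk joins instead of per-char concatenation, measured faster in a timing run).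

-- ===== PORT A =====
-- `i.isalnum() or i in special` (special = ['-', '_', '.'])
def pvKeep (i : Char) : Bool := PySem.Chars.isalnum i || ['-', '_', '.'].contains i

-- body of the 3단계 loop: `if new_id[i] == '.' and temp[-1] == '.': continue else: temp += new_id[i]`
-- (temp is always nonempty here, so temp[-1] is PySem.List.pyGet? temp (-1))
def pvCollapseStep (temp : List Char) (i : Char) : List Char :=
  if i == '.' && PySem.List.pyGet? temp (-1) == some '.' then temp else temp ++ [i]

-- 4단계
def pvA_stage4 (t : List Char) : List Char :=
  if t.length ≥ 2 then
    let t := if PySem.List.pyGet? t 0 == some '.' then PySem.List.slice t (some 1) none else t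
    if PySem.List.pyGet? t (-1) == some '.' then PySem.List.slice t none (some (-1)) else t
  else if t = ['.'] then [] else t

-- 6단계
def pvA_stage6 (t : List Char) : List Char :=
  if t.length ≥ 16 then
    let t := PySem.List.slice t none (some 15)
    if PySem.List.pyGet? t (-1) == some '.' then PySem.List.slice t none (some (-1)) else t
  else t

-- 7단계: `while len(new_id) <= 2: new_id = new_id + new_id[-1]`
def pvPad (t : List Char) : List Char :=
  if t.length ≤ 2 then
    match t.getLast? with
    | some c => pvPad (t ++ [c])
    | none => t      -- Python: new_id[-1] raises IndexError on "" (unreachable under Pre_solution)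
  else t
termination_by 3 - t.length
decreasing_by simp; omega

def solution (new_id : String) : String :=
  -- 1단계
  let s := PySem.Chars.lower new_id.toList
  -- 2단계
  let temp := s.foldl (fun t i => if pvKeep i then t ++ [i] else t) []
  -- 3단계: temp = new_id[0]; for i in range(1, len(new_id)) reads new_id[1:]
  match PySem.List.pyGet? temp 0 with
  | none => ""        -- Python raises IndexError at new_id[0] (excluded by Pre_solution)
  | some t0 =>
    let t := (PySem.List.slice temp (some 1) none).foldl pvCollapseStep [t0]
    let t := pvA_stage4 t
    -- 5단계
    let t := if t = [] then ['a'] else t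
    let t := pvA_stage6 t
    String.ofList (pvPad t)

-- ===== PORT B =====
-- s.rstrip('.') — drop every trailing '.' (exact: rstrip removes trailing chars of the set {'.'})
def pvRstripDots (l : List Char) : List Char := (l.reverse.dropWhile (· == '.')).reverse

def solution_alt (new_id : String) : String :=
  let s := (PySem.Chars.lower new_id.toList).filter pvKeep
  let s := PySem.Chars.join ['.'] ((PySem.Chars.splitOn s ['.']).filter (· ≠ []))
  let s := if s = [] then ['a'] else s
  let s := pvRstripDots (PySem.List.slice s none (some 15))
  -- s.ljust(3, s[-1]); s is nonempty here, the none branch mirrors Python's IndexError on ""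
  match s.getLast? with
  | some c => String.ofList (s ++ List.replicate (3 - s.length) c)
  | none => String.ofList s

-- ===== PRECONDITION & SPEC =====
-- Pre_ excludes exactly the inputs that contain no keepable character at all: there A's `new_id[0]`
-- raises IndexError (A returns on every input inside Pre_; B returns "aaa" there).
def Pre_solution (new_id : String) : Prop :=
  new_id.toList.any (fun c => pvKeep (PySem.Chars.lowerChar c)) = true
instance (new_id : String) : Decidable (Pre_solution new_id) := by unfold Pre_solution; infer_instance

def pvWitness_solution : String := "abc"

def Spec_solution (new_id : String) (out : String) : Prop := out = solution_alt new_id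
instance (new_id : String) (out : String) : Decidable (Spec_solution new_id out) := by unfold Spec_solution; infer_instance

-- ===== CLAIM (what is proved, stated in full; the proofs are below) =====
def Claim_equal_solution : Prop := ∀ (new_id : String), Dom_solution new_id → Pre_solution new_id → Spec_solution new_id (solution new_id)

-- ===== LEMMAS AND PROOFS =====

-- recursive form of A's 3단계 loop
def pvCollapse : List Char → List Char
  | [] => []
  | [a] => [a]
  | a :: b :: r => if a = '.' ∧ b = '.' then pvCollapse (a :: r) else a :: pvCollapse (b :: r)

-- 4단계 as two total strips
def pvStripL (t : List Char) : List Char := if t.head? = some '.' then t.tail else t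
def pvStripT (t : List Char) : List Char := if t.getLast? = some '.' then t.dropLast else t

-- the common normal form after stages 3-4: collapse dot runs, strip edge dots
def pvNorm : Bool → List Char → List Char
  | _, [] => []
  | inWord, c :: r =>
    if c = '.' then
      if inWord then (if pvNorm false r = [] then [] else '.' :: pvNorm false r)
      else pvNorm false r
    else c :: pvNorm true r

def pvOkRel (a b : Char) : Prop := ¬(a = '.' ∧ b = '.')

theorem pv_pyGet_zero (l : List Char) : PySem.List.pyGet? l 0 = l.head? := by
  simp [PySem.List.pyGet?, PySem.List.pyIdx?]; cases l <;> simp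

theorem pv_collapse_foldl (rest : List Char) : ∀ (acc : List Char) (x : Char),
    rest.foldl pvCollapseStep (acc ++ [x]) = acc ++ pvCollapse (x :: rest) := by
  induction rest with
  | nil => intro acc x; simp [pvCollapse]
  | cons c r ih =>
    intro acc x
    simp only [List.foldl_cons]
    rw [show pvCollapseStep (acc ++ [x]) c =
        if c = '.' ∧ x = '.' then acc ++ [x] else (acc ++ [x]) ++ [c] from ?_]
    · by_cases h : c = '.' ∧ x = '.'
      · rw [if_pos h]
        rw [ih acc x]
        have : pvCollapse (x :: c :: r) = pvCollapse (x :: r) := by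
          rw [pvCollapse]; rw [if_pos ⟨h.2, h.1⟩]
        rw [this]
      · rw [if_neg h]
        rw [ih (acc ++ [x]) c]
        have : pvCollapse (x :: c :: r) = x :: pvCollapse (c :: r) := by
          rw [pvCollapse]; rw [if_neg (fun hx => h ⟨hx.2, hx.1⟩)]
        rw [this]; simp
    · simp [pvCollapseStep, PySem.List.pyGet?_neg_one]

theorem pv_splitOn_go (fuel : Nat) : ∀ (s cur : List Char) (acc : List (List Char)), s.length < fuel →
    PySem.Chars.splitOn.go ['.'] fuel s cur acc
      = acc.reverse ++ (List.splitOnP (· == '.') s).modifyHead (cur.reverse ++ ·) := by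
  induction fuel with
  | zero => intro s cur acc h; omega
  | succ n ih =>
    intro s cur acc h
    cases s with
    | nil => simp [PySem.Chars.splitOn.go, List.splitOnP_nil]
    | cons c rest =>
      rw [PySem.Chars.splitOn.go]
      by_cases hc : c = '.'
      · subst hc
        rw [if_pos (by simp [List.isPrefixOf])]
        rw [ih _ _ _ (by simpa using Nat.lt_of_succ_lt_succ h)]
        rw [List.splitOnP_cons]
        simp
        cases hx : List.splitOnP (fun x => x == '.') rest <;> simp
      · rw [if_neg (by simp [List.isPrefixOf]; exact fun h => hc h.symm)]
        rw [ih _ _ _ (by simpa using Nat.lt_of_succ_lt_succ h)]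
        rw [List.splitOnP_cons]
        rw [if_neg (by simp [hc])]
        obtain ⟨hd, tl, hsp⟩ : ∃ hd tl, List.splitOnP (· == '.') rest = hd :: tl := by
          rcases hx : List.splitOnP (· == '.') rest with _ | ⟨hd, tl⟩
          · exact absurd hx (List.splitOnP_ne_nil _ _)
          · exact ⟨hd, tl, rfl⟩
        rw [hsp]; simp

theorem pv_splitOn_eq (s : List Char) :
    PySem.Chars.splitOn s ['.'] = List.splitOnP (· == '.') s := by
  rw [PySem.Chars.splitOn, pv_splitOn_go (s.length + 1) s [] [] (by omega)]
  rcases hx : List.splitOnP (· == '.') s with _ | ⟨hd, tl⟩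
  · exact absurd hx (List.splitOnP_ne_nil _ _)
  · simp

theorem pv_join_cons (p : List Char) (ps : List (List Char)) :
    PySem.Chars.join ['.'] (p :: ps)
      = p ++ (if ps = [] then [] else '.' :: PySem.Chars.join ['.'] ps) := by
  cases ps <;> simp [PySem.Chars.join, List.intercalate]

theorem pv_join_ne_nil (ps : List (List Char)) (h : ∀ p ∈ ps, p ≠ []) :
    (PySem.Chars.join ['.'] ps = [] ↔ ps = []) := by
  cases ps with
  | nil => simp [PySem.Chars.join, List.intercalate]
  | cons p tl =>
    rw [pv_join_cons]
    simp only [List.cons_ne_nil, iff_false]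
    intro hx
    exact h p (by simp) (by rcases List.append_eq_nil_iff.mp hx with ⟨h1, _⟩; exact h1)

theorem pv_join_split (s : List Char) :
    (PySem.Chars.join ['.'] ((List.splitOnP (· == '.') s).filter (· ≠ [])) = pvNorm false s)
    ∧ (∀ h tl, List.splitOnP (· == '.') s = h :: tl →
        h ++ (if tl.filter (· ≠ []) = [] then []
              else '.' :: PySem.Chars.join ['.'] (tl.filter (· ≠ []))) = pvNorm true s) := by
  induction s with
  | nil =>
    constructor
    · simp [List.splitOnP_nil, PySem.Chars.join, List.intercalate, pvNorm]
    · intro h tl heq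
      rw [List.splitOnP_nil] at heq
      cases heq
      simp [pvNorm]
  | cons c r ih =>
    obtain ⟨ih1, ih2⟩ := ih
    by_cases hc : c = '.'
    · subst hc
      have hsp : List.splitOnP (· == '.') ('.' :: r) = [] :: List.splitOnP (· == '.') r := by
        rw [List.splitOnP_cons]; simp
      constructor
      · rw [hsp]
        have : ([] :: List.splitOnP (· == '.') r).filter (· ≠ [])
             = (List.splitOnP (· == '.') r).filter (· ≠ []) := by simp
        rw [this, ih1]
        simp [pvNorm]
      · intro h tl heq
        rw [hsp] at heq
        obtain ⟨rfl, rfl⟩ : h = [] ∧ tl = List.splitOnP (· == '.') r := by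
          cases heq; exact ⟨rfl, rfl⟩
        -- goal: if filter = [] then [] else '.'::join = pvNorm true ('.'::r)
        have hfe : PySem.Chars.join ['.'] ((List.splitOnP (· == '.') r).filter (· ≠ [])) = pvNorm false r := ih1
        have hne : ∀ p ∈ (List.splitOnP (· == '.') r).filter (· ≠ []), p ≠ [] := by
          intro p hp
          have := (List.mem_filter.mp hp).2
          simpa using this
        have hiff := pv_join_ne_nil _ hne
        show _ = pvNorm true ('.' :: r)
        rw [show pvNorm true ('.' :: r) = (if pvNorm false r = [] then [] else '.' :: pvNorm false r) from by simp [pvNorm]]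
        rw [← hfe]
        by_cases hfil : (List.splitOnP (· == '.') r).filter (· ≠ []) = []
        · rw [if_pos hfil, if_pos (hiff.mpr hfil)]
          simp
        · rw [if_neg hfil, if_neg (by rw [hiff]; exact hfil)]
          simp
    · have hne' : (c == '.') = false := by simp [hc]
      obtain ⟨hd, tl0, hsp0⟩ : ∃ hd tl, List.splitOnP (· == '.') r = hd :: tl := by
        rcases hx : List.splitOnP (· == '.') r with _ | ⟨hd, tl⟩
        · exact absurd hx (List.splitOnP_ne_nil _ _)
        · exact ⟨hd, tl, rfl⟩
      have hsp : List.splitOnP (· == '.') (c :: r) = (c :: hd) :: tl0 := by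
        rw [List.splitOnP_cons, hne']; simp [hsp0]
      have key : (c :: hd) ++ (if tl0.filter (· ≠ []) = [] then []
              else '.' :: PySem.Chars.join ['.'] (tl0.filter (· ≠ []))) = c :: pvNorm true r := by
        have := ih2 hd tl0 hsp0
        rw [← this]; simp
      constructor
      · rw [hsp]
        have : ((c :: hd) :: tl0).filter (· ≠ []) = (c :: hd) :: tl0.filter (· ≠ []) := by simp
        rw [this, pv_join_cons]
        rw [show pvNorm false (c :: r) = c :: pvNorm true r from by simp [pvNorm, hc]]
        exact key
      · intro h tl heq
        rw [hsp] at heq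
        obtain ⟨rfl, rfl⟩ : h = c :: hd ∧ tl = tl0 := by cases heq; exact ⟨rfl, rfl⟩
        rw [show pvNorm true (c :: r) = c :: pvNorm true r from by simp [pvNorm, hc]]
        exact key

theorem pv_collapse_head (r : List Char) : ∀ (c : Char), (pvCollapse (c :: r)).head? = some c := by
  induction r with
  | nil => intro c; simp [pvCollapse]
  | cons b r2 ih =>
    intro c
    rw [pvCollapse]
    by_cases h : c = '.' ∧ b = '.'
    · rw [if_pos h]; rw [show ('.' : Char) = c from h.1.symm] at *; exact ih c
    · rw [if_neg h]; simp

theorem pv_collapse_ne_nil (c : Char) (r : List Char) : pvCollapse (c :: r) ≠ [] := by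
  intro h
  have := pv_collapse_head r c
  rw [h] at this; simp at this

theorem pv_getLast?_cons (a : Char) (u : List Char) (h : u ≠ []) :
    (a :: u).getLast? = u.getLast? := by
  cases u with
  | nil => exact absurd rfl h
  | cons b v => simp [List.getLast?_cons_cons]

theorem pv_stripT_cons (a : Char) (u : List Char) (h : u ≠ []) :
    pvStripT (a :: u) = a :: pvStripT u := by
  unfold pvStripT
  rw [pv_getLast?_cons a u h]
  by_cases hl : u.getLast? = some '.'
  · rw [if_pos hl, if_pos hl, List.dropLast_cons_of_ne_nil h]
  · rw [if_neg hl, if_neg hl]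

theorem pv_Q (r : List Char) (c : Char) (hc : c ≠ '.') :
    pvStripT (pvCollapse (c :: r)) = pvNorm false (c :: r) := by
  induction hn : r.length using Nat.strong_induction_on generalizing r c with
  | _ n ih =>
  subst hn
  rw [show pvNorm false (c :: r) = c :: pvNorm true r from by simp [pvNorm, hc]]
  cases r with
  | nil => simp [pvCollapse, pvStripT, pvNorm, hc]
  | cons b r2 =>
    by_cases hb : b = '.'
    · subst hb
      cases r2 with
      | nil =>
        rw [show pvCollapse [c, '.'] = [c, '.'] from by simp [pvCollapse, hc]]
        simp [pvStripT, pvNorm]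
      | cons d r3 =>
        by_cases hd : d = '.'
        · subst hd
          rw [show pvCollapse (c :: '.' :: '.' :: r3) = pvCollapse (c :: '.' :: r3) from by
            rw [pvCollapse, if_neg (by tauto), pvCollapse, if_pos ⟨rfl, rfl⟩,
                pvCollapse, if_neg (by tauto)]]
          rw [ih ('.' :: r3).length (by simp) ('.' :: r3) c hc rfl]
          have h1 : pvNorm true ('.' :: '.' :: r3) = pvNorm true ('.' :: r3) := by
            simp [pvNorm]
          rw [show pvNorm false (c :: '.' :: r3) = c :: pvNorm true ('.' :: r3) from by
            rw [pvNorm, if_neg hc], h1]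
        · -- r = '.' :: d :: r3, d ≠ '.'
          have hvne := pv_collapse_ne_nil d r3
          rw [show pvCollapse (c :: '.' :: d :: r3) = c :: '.' :: pvCollapse (d :: r3) from by
            rw [pvCollapse, if_neg (by tauto), pvCollapse, if_neg (by tauto)]]
          rw [pv_stripT_cons _ _ (by simp), pv_stripT_cons _ _ hvne]
          rw [ih r3.length (by simp) r3 d hd rfl]
          rw [show pvNorm false (d :: r3) = d :: pvNorm true r3 from by simp [pvNorm, hd]]
          rw [show pvNorm true ('.' :: d :: r3)
              = if pvNorm false (d :: r3) = [] then [] else '.' :: pvNorm false (d :: r3) from by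
            simp [pvNorm]]
          rw [show pvNorm false (d :: r3) = d :: pvNorm true r3 from by simp [pvNorm, hd]]
          simp
    · rw [show pvCollapse (c :: b :: r2) = c :: pvCollapse (b :: r2) from by
        rw [pvCollapse, if_neg (by tauto)]]
      rw [pv_stripT_cons _ _ (pv_collapse_ne_nil b r2)]
      rw [ih r2.length (by simp) r2 b hb rfl]
      rw [show pvNorm false (b :: r2) = b :: pvNorm true r2 from by simp [pvNorm, hb]]
      rw [show pvNorm true (b :: r2) = b :: pvNorm true r2 from by simp [pvNorm, hb]]

theorem pv_P2 : ∀ (n : Nat) (t : List Char), t.length = n → t ≠ [] →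
    pvStripT (pvStripL (pvCollapse t)) = pvNorm false t := by
  intro n
  induction n using Nat.strong_induction_on with
  | _ n ih =>
  intro t hn hne
  cases t with
  | nil => exact absurd rfl hne
  | cons c r =>
    by_cases hc : c = '.'
    · subst hc
      cases r with
      | nil => simp [pvCollapse, pvStripL, pvStripT, pvNorm]
      | cons b r2 =>
        by_cases hb : b = '.'
        · subst hb
          rw [show pvCollapse ('.' :: '.' :: r2) = pvCollapse ('.' :: r2) from by
            rw [pvCollapse, if_pos ⟨rfl, rfl⟩]]
          rw [ih ('.' :: r2).length (by simp at hn; simp; omega) ('.' :: r2) rfl (by simp)]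
          simp [pvNorm]
        · rw [show pvCollapse ('.' :: b :: r2) = '.' :: pvCollapse (b :: r2) from by
            rw [pvCollapse, if_neg (by tauto)]]
          rw [show pvStripL ('.' :: pvCollapse (b :: r2)) = pvCollapse (b :: r2) from by
            simp [pvStripL]]
          rw [pv_Q r2 b hb]
          rw [show pvNorm false ('.' :: b :: r2) = pvNorm false (b :: r2) from by
            rw [pvNorm]; simp]
    · rw [show pvStripL (pvCollapse (c :: r)) = pvCollapse (c :: r) from by
        unfold pvStripL
        rw [pv_collapse_head r c, if_neg (by simp [hc])]]
      exact pv_Q r c hc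

theorem pv_stage4_eq (u : List Char) (h : u ≠ []) : pvA_stage4 u = pvStripT (pvStripL u) := by
  unfold pvA_stage4
  by_cases h2 : u.length ≥ 2
  · rw [if_pos h2]
    have hL : (if PySem.List.pyGet? u 0 == some '.' then PySem.List.slice u (some 1) none else u)
        = pvStripL u := by
      rw [pv_pyGet_zero, PySem.List.slice_from_one]
      unfold pvStripL
      by_cases hh : u.head? = some '.'
      · rw [if_pos (by simp [hh]), if_pos hh]
      · rw [if_neg (by simp [hh]), if_neg hh]
    rw [hL]
    show (if (PySem.List.pyGet? (pvStripL u) (-1) == some '.') = true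
          then PySem.List.slice (pvStripL u) none (some (-1)) else pvStripL u) = _
    rw [PySem.List.pyGet?_neg_one, PySem.List.slice_to_neg_one]
    unfold pvStripT
    by_cases hl : (pvStripL u).getLast? = some '.'
    · rw [if_pos (by simp [hl]), if_pos hl]
    · rw [if_neg (by simp [hl]), if_neg hl]
  · rw [if_neg h2]
    cases u with
    | nil => exact absurd rfl h
    | cons a t =>
      cases t with
      | cons x y => simp at h2
      | nil =>
        by_cases ha : a = '.'
        · subst ha; simp [pvStripL, pvStripT]
        · rw [if_neg (by simp [ha])]
          simp [pvStripL, pvStripT, ha]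

theorem pv_norm_props (s : List Char) :
    (∀ b, (pvNorm b s).getLast? ≠ some '.' ∧ (pvNorm b s).IsChain pvOkRel)
    ∧ (pvNorm false s).head? ≠ some '.' := by
  induction s with
  | nil => simp [pvNorm]
  | cons c r ih =>
    obtain ⟨ihb, ihh⟩ := ih
    by_cases hc : c = '.'
    · subst hc
      have hfalse : pvNorm false ('.' :: r) = pvNorm false r := by simp [pvNorm]
      have htrue : pvNorm true ('.' :: r)
          = (if pvNorm false r = [] then [] else '.' :: pvNorm false r) := by simp [pvNorm]
      refine ⟨?_, by rw [hfalse]; exact ihh⟩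
      intro b
      cases b
      · rw [hfalse]; exact ihb false
      · rw [htrue]
        by_cases he : pvNorm false r = []
        · simp [he]
        · rw [if_neg he]
          obtain ⟨x, u, hx⟩ : ∃ x u, pvNorm false r = x :: u := by
            rcases hq : pvNorm false r with _ | ⟨x, u⟩
            · exact absurd hq he
            · exact ⟨x, u, rfl⟩
          constructor
          · rw [show ('.' :: pvNorm false r).getLast? = (pvNorm false r).getLast? from by
              cases hq : pvNorm false r with
              | nil => exact absurd hq he
              | cons x u => simp [List.getLast?_cons_cons]]
            exact (ihb false).1
          · rw [hx, List.isChain_cons_cons]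
            refine ⟨?_, hx ▸ (ihb false).2⟩
            have : (pvNorm false r).head? ≠ some '.' := ihh
            rw [hx] at this
            simp at this
            exact fun h => this h.2
    · have hval : ∀ b, pvNorm b (c :: r) = c :: pvNorm true r := by
        intro b; simp [pvNorm, hc]
      refine ⟨?_, by rw [hval false]; simp [hc]⟩
      intro b
      rw [hval b]
      constructor
      · by_cases he : pvNorm true r = []
        · simp [he, hc]
        · rw [show (c :: pvNorm true r).getLast? = (pvNorm true r).getLast? from by
            cases hq : pvNorm true r with
            | nil => exact absurd hq he
            | cons x u => simp [List.getLast?_cons_cons]]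
          exact (ihb true).1
      · rw [List.isChain_cons]
        refine ⟨?_, (ihb true).2⟩
        intro y _
        exact fun h => hc h.1

theorem pv_rstrip_noop (l : List Char) (h : l.getLast? ≠ some '.') : pvRstripDots l = l := by
  unfold pvRstripDots
  cases hq : l.reverse with
  | nil => simpa using (congrArg List.reverse hq).symm
  | cons x u =>
    have hx : x ≠ '.' := by
      have : l.reverse.head? = l.getLast? := List.head?_reverse
      rw [hq] at this; simp at this
      intro he; exact h (by rw [← this, he])
    rw [List.dropWhile_cons, if_neg (by simp [hx])]
    simpa using (congrArg List.reverse hq).symm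

theorem pv_rstrip_concat (v : List Char) (h : v.getLast? ≠ some '.') :
    pvRstripDots (v ++ ['.']) = v := by
  unfold pvRstripDots
  rw [List.reverse_append]
  simp only [List.reverse_cons, List.reverse_nil, List.nil_append, List.cons_append,
    List.dropWhile_cons]
  rw [if_pos (by simp)]
  cases hq : v.reverse with
  | nil => simpa using (congrArg List.reverse hq).symm
  | cons x u =>
    have hx : x ≠ '.' := by
      have : v.reverse.head? = v.getLast? := List.head?_reverse
      rw [hq] at this; simp at this
      intro he; exact h (by rw [← this, he])
    rw [List.dropWhile_cons, if_neg (by simp [hx])]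
    simpa using (congrArg List.reverse hq).symm

theorem pv_stage6_eq (e : List Char) (hne : e ≠ []) (hl : e.getLast? ≠ some '.')
    (hch : e.IsChain pvOkRel) :
    pvA_stage6 e = pvRstripDots (e.take 15) := by
  unfold pvA_stage6
  by_cases h16 : e.length ≥ 16
  · rw [if_pos h16]
    rw [show PySem.List.slice e none (some 15) = e.take 15 from by
      rw [PySem.List.slice_to e (by norm_num), show ((15:Int).toNat) = 15 from rfl]]
    show (if (PySem.List.pyGet? (e.take 15) (-1) == some '.') = true
          then PySem.List.slice (e.take 15) none (some (-1)) else e.take 15) = _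
    rw [PySem.List.pyGet?_neg_one, PySem.List.slice_to_neg_one]
    by_cases hd : (e.take 15).getLast? = some '.'
    · rw [if_pos (by simp [hd])]
      -- e.take 15 = v ++ ['.'] with v.getLast? ≠ '.'
      have hlen : (e.take 15).length = 15 := by rw [List.length_take]; omega
      obtain ⟨v, hv⟩ : ∃ v, e.take 15 = v ++ ['.'] := by
        rcases hq : (e.take 15).getLast? with _ | x
        · rw [hq] at hd; simp at hd
        · have := List.getLast?_eq_some_iff.mp hq
          obtain ⟨v, hv⟩ := this
          rw [hq] at hd; cases hd
          exact ⟨v, hv⟩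
      have hchg : (e.take 15).IsChain pvOkRel := hch.take 15
      have hvl : v.getLast? ≠ some '.' := by
        rw [hv] at hchg
        rw [List.isChain_append] at hchg
        intro hvl'
        exact (hchg.2.2 '.' (by simpa using hvl') '.' (by simp)) ⟨rfl, rfl⟩
      rw [hv, pv_rstrip_concat v hvl]
      simp
    · rw [if_neg (by simp [hd]), pv_rstrip_noop _ hd]
  · rw [if_neg h16]
    have : e.take 15 = e := List.take_of_length_le (by omega)
    rw [this, pv_rstrip_noop _ hl]

theorem pv_stage6_ne (e : List Char) (hne : e ≠ []) (hh : e.head? ≠ some '.')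
    (hl : e.getLast? ≠ some '.') (hch : e.IsChain pvOkRel) :
    pvRstripDots (e.take 15) ≠ [] := by
  cases e with
  | nil => exact absurd rfl hne
  | cons a t =>
    have ha : a ≠ '.' := by simp at hh; exact hh
    intro hcon
    unfold pvRstripDots at hcon
    have := congrArg List.reverse hcon
    simp at this
    exact ha (this a (Or.inr rfl))

theorem pv_pad_eq (f : List Char) (c : Char) (h : f.getLast? = some c) :
    pvPad f = f ++ List.replicate (3 - f.length) c := by
  match f with
  | [] => simp at h
  | [a] =>
    simp at h; subst h
    rw [pvPad]; simp
    rw [pvPad]; simp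
    rw [pvPad]; simp
  | [a, b] =>
    simp at h; subst h
    rw [pvPad]; simp
    rw [pvPad]; simp
  | a :: b :: d :: rest =>
    rw [pvPad]
    have : (a :: b :: d :: rest).length > 2 := by simp
    rw [if_neg (by omega)]
    have : 3 - (a :: b :: d :: rest).length = 0 := by simp
    rw [this]
    simp


-- ===== VERDICT (by name: the statement is the Claim_ definition above) =====
theorem solution_spec : Claim_equal_solution := by
  intro new_id _ hpre
  unfold Spec_solution
  simp only [solution, solution_alt]
  rw [show (PySem.Chars.lower new_id.toList).foldl
        (fun t i => if pvKeep i then t ++ [i] else t) []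
      = (PySem.Chars.lower new_id.toList).filter pvKeep from by
    simpa using PySem.List.foldl_append_if pvKeep id (PySem.Chars.lower new_id.toList) []]
  have hne : (PySem.Chars.lower new_id.toList).filter pvKeep ≠ [] := by
    unfold Pre_solution at hpre
    simp only [PySem.Chars.lower]
    rw [List.filter_map]
    intro hcon
    rw [List.map_eq_nil_iff, List.filter_eq_nil_iff] at hcon
    rw [List.any_eq_true] at hpre
    obtain ⟨c, hc, hk⟩ := hpre
    exact absurd hk (by simpa using hcon c hc)
  obtain ⟨t0, rest, htemp⟩ : ∃ t0 rest,
      (PySem.Chars.lower new_id.toList).filter pvKeep = t0 :: rest := by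
    rcases hx : (PySem.Chars.lower new_id.toList).filter pvKeep with _ | ⟨t0, rest⟩
    · exact absurd hx hne
    · exact ⟨t0, rest, rfl⟩
  rw [htemp]
  rw [show PySem.List.pyGet? (t0 :: rest) 0 = some t0 from by rw [pv_pyGet_zero]; rfl]
  -- reduce A's match and name the common intermediate values
  rw [PySem.List.slice_from_one]
  show String.ofList (pvPad (pvA_stage6 (if pvA_stage4
        ((t0 :: rest).tail.foldl pvCollapseStep [t0]) = [] then ['a']
        else pvA_stage4 ((t0 :: rest).tail.foldl pvCollapseStep [t0])))) = _
  rw [show (t0 :: rest).tail = rest from rfl]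
  rw [show rest.foldl pvCollapseStep [t0] = pvCollapse (t0 :: rest) from by
    simpa using pv_collapse_foldl rest [] t0]
  rw [pv_stage4_eq _ (pv_collapse_ne_nil t0 rest)]
  rw [pv_P2 (t0 :: rest).length (t0 :: rest) rfl (by simp)]
  -- B side: split/join pipeline is the same normal form
  rw [pv_splitOn_eq, (pv_join_split (t0 :: rest)).1]
  -- common value e after stage 5
  set n := pvNorm false (t0 :: rest) with hn
  set e : List Char := if n = [] then ['a'] else n with he
  have hprops := pv_norm_props (t0 :: rest)
  have heprops : e ≠ [] ∧ e.head? ≠ some '.' ∧ e.getLast? ≠ some '.' ∧ e.IsChain pvOkRel := by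
    by_cases hz : n = []
    · rw [he, if_pos hz]
      refine ⟨by simp, by simp, by simp, by simp⟩
    · rw [he, if_neg hz]
      exact ⟨hz, (hn ▸ hprops.2), hn ▸ (hprops.1 false).1, hn ▸ (hprops.1 false).2⟩
  obtain ⟨hene, heh, hel, hech⟩ := heprops
  rw [pv_stage6_eq e hene hel hech]
  rw [PySem.List.slice_to e (by norm_num), show ((15:Int)).toNat = 15 from rfl]
  have hf := pv_stage6_ne e hene heh hel hech
  obtain ⟨c, hc⟩ : ∃ c, (pvRstripDots (e.take 15)).getLast? = some c := by
    rcases hx : (pvRstripDots (e.take 15)).getLast? with _ | c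
    · rw [List.getLast?_eq_none_iff] at hx; exact absurd hx hf
    · exact ⟨c, rfl⟩
  rw [hc]
  show String.ofList (pvPad (pvRstripDots (e.take 15))) = _
  rw [pv_pad_eq _ c hc]
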